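-- pv_equiv track=rewrite | github.com/meherab303/learningpython | leetcode/stringIsPrefixOfArray.py | prefixOfArray
-- ===== SOURCE A (Python) =====
-- def prefixOfArray(s,words):
--     string=''
--     for elem in words:
--         string+=elem
--         if string==s:
--             return True
--         if len(string) >len(s):
--             return False
--     return False
-- ===== SOURCE B (Python) =====
-- def prefixOfArray(s, words):
--     sums = []
--     t = 0
--     for w in words:
--         t += len(w)
--         sums.append(t)
--     if len(s) not in sums:
--         return False
--     return ''.join(words).startswith(s)
-- ===== Notes on version B (the rewrite author's own statement) =====
-- stated objective: alternative
-- what changed: B drops A's incremental concatenate-and-compare loop with early exit: it builds the list of cumulative word lengths, tests whether len(s) occurs in it, and then checks s once against the full join via startswith.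
import Mathlib
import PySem

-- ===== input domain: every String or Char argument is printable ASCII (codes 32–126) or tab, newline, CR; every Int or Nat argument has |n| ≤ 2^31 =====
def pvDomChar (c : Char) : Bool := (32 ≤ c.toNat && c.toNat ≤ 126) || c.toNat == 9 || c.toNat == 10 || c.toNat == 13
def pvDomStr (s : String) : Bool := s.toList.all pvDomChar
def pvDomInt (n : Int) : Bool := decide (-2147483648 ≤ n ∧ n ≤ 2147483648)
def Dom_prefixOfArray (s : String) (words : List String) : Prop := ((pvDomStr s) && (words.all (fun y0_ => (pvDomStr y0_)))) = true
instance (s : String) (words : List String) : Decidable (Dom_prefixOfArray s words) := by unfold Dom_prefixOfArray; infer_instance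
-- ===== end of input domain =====

-- B replaces A's incremental concatenate-and-compare loop by a cumulative-length table,
-- a membership test for len(s), and one startswith check on the full join
-- (objective: alternative decomposition; no speed claim). Strings handled as List Char.

-- ===== PORT A =====
-- A's loop: string += elem; return True on string == s; return False once len(string) > len(s).
def prefixOfArrayGoA (sL : List Char) (acc : List Char) (ws : List String) : Bool :=
  match ws with
  | [] => false
  | w :: rest =>
    if acc ++ w.toList = sL then true
    else if sL.length < (acc ++ w.toList).length then false
    else prefixOfArrayGoA sL (acc ++ w.toList) rest

def prefixOfArray (s : String) (words : List String) : Bool :=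
  prefixOfArrayGoA s.toList [] words

-- ===== PORT B =====
-- B's first loop: sums.append(t += len(w)) — the cumulative word lengths starting from t.
def pvAccLens (t : Nat) (ws : List String) : List Nat :=
  match ws with
  | [] => []
  | w :: rest => (t + w.toList.length) :: pvAccLens (t + w.toList.length) rest

-- B: `len(s) not in sums` then `''.join(words).startswith(s)`.
def prefixOfArray_alt (s : String) (words : List String) : Bool :=
  if (pvAccLens 0 words).contains s.toList.length then
    s.toList.isPrefixOf (words.flatMap String.toList)
  else false

-- ===== PRECONDITION & SPEC =====
def Spec_prefixOfArray (s : String) (words : List String) (out : Bool) : Prop := out = prefixOfArray_alt s words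
instance (s : String) (words : List String) (out : Bool) : Decidable (Spec_prefixOfArray s words out) := by unfold Spec_prefixOfArray; infer_instance

-- ===== CLAIM (what is proved, stated in full; the proofs are below) =====
def Claim_equal_prefixOfArray : Prop := ∀ (s : String) (words : List String), Dom_prefixOfArray s words → Spec_prefixOfArray s words (prefixOfArray s words)

-- ===== LEMMAS AND PROOFS =====

-- Every cumulative sum starting from t is at least t.
theorem accLens_lb (ws : List String) : ∀ (t x : Nat), x ∈ pvAccLens t ws → t ≤ x := by
  induction ws with
  | nil => intro t x h; simp [pvAccLens] at h
  | cons w rest ih =>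
    intro t x h
    simp only [pvAccLens, List.mem_cons] at h
    rcases h with h | h
    · omega
    · have := ih (t + w.toList.length) x h; omega

-- Once the accumulated string is at least as long as s yet differs from it, A returns False.
theorem goA_false (sL : List Char) (ws : List String) :
    ∀ acc : List Char, sL.length ≤ acc.length → acc ≠ sL → prefixOfArrayGoA sL acc ws = false := by
  induction ws with
  | nil => intro acc _ _; rfl
  | cons w rest ih =>
    intro acc hlen hne
    simp only [prefixOfArrayGoA]
    by_cases heq : acc ++ w.toList = sL
    · exfalso
      have h1 : (acc ++ w.toList).length = sL.length := by rw [heq]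
      rw [List.length_append] at h1
      have hw : w.toList.length = 0 := by omega
      have hnil : w.toList = [] := List.eq_nil_of_length_eq_zero hw
      rw [hnil, List.append_nil] at heq
      exact hne heq
    · rw [if_neg heq]
      by_cases hl : sL.length < (acc ++ w.toList).length
      · rw [if_pos hl]
      · rw [if_neg hl]
        rw [List.length_append] at hl
        exact ih (acc ++ w.toList) (by rw [List.length_append]; omega) heq

-- Main invariant: A's loop equals "len(s) occurs among the cumulative lengths, and s is
-- what sits at position [0, len(s)) of the remaining concatenation prefixed by acc".
theorem goA_eq (sL : List Char) (ws : List String) :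
    ∀ acc : List Char, acc.length ≤ sL.length →
      prefixOfArrayGoA sL acc ws =
        ((pvAccLens acc.length ws).contains sL.length
          && decide ((acc ++ ws.flatMap String.toList).take sL.length = sL)) := by
  induction ws with
  | nil => intro acc _; simp [prefixOfArrayGoA, pvAccLens]
  | cons w rest ih =>
    intro acc hle
    have hwl : w.toList.length = w.length := by simp
    simp only [prefixOfArrayGoA, pvAccLens]
    by_cases heq : acc ++ w.toList = sL
    · have hlen : acc.length + w.length = sL.length := by
        rw [← heq, List.length_append, hwl]
      have htake : ((acc ++ w.toList) ++ rest.flatMap String.toList).take sL.length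
          = acc ++ w.toList := by
        apply List.take_left'
        rw [List.length_append, hwl]; exact hlen
      rw [if_pos heq]
      simp only [List.contains_cons, List.flatMap_cons, ← List.append_assoc, htake]
      simp [heq, hlen]
    · rw [if_neg heq]
      by_cases hl : sL.length < (acc ++ w.toList).length
      · rw [if_pos hl]
        rw [List.length_append, hwl] at hl
        -- len(s) is below every cumulative sum here, so contains is false
        have hcon : ((acc.length + w.toList.length) :: pvAccLens (acc.length + w.toList.length) rest).contains sL.length = false := by
          simp only [List.contains_eq_mem, List.mem_cons, decide_eq_false_iff_not, hwl]
          rintro (h | h)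
          · omega
          · have := accLens_lb rest (acc.length + w.length) sL.length h; omega
        rw [hcon]; simp
      · rw [if_neg hl]
        rw [List.length_append, hwl] at hl
        by_cases hlen : acc.length + w.length = sL.length
        · -- length matches but content differs: both sides are false
          have hA : prefixOfArrayGoA sL (acc ++ w.toList) rest = false :=
            goA_false sL rest (acc ++ w.toList) (by rw [List.length_append, hwl]; omega) heq
          have htake : ((acc ++ w.toList) ++ rest.flatMap String.toList).take sL.length
              = acc ++ w.toList := by
            apply List.take_left'
            rw [List.length_append, hwl]; exact hlen
          rw [hA]
          simp only [List.flatMap_cons, ← List.append_assoc, htake]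
          simp [heq]
        · have h := ih (acc ++ w.toList) (by rw [List.length_append, hwl]; omega)
          rw [h, List.length_append, hwl]
          simp only [List.contains_cons, List.flatMap_cons, ← List.append_assoc]
          have hne : (sL.length == acc.length + w.length) = false := by
            simpa using (by omega : sL.length ≠ acc.length + w.length)
          rw [hne]
          simp

-- Prefix vs take: s <+: l iff s equals the first |s| elements of l.
theorem isPrefixOf_eq_take (sL full : List Char) :
    sL.isPrefixOf full = decide (full.take sL.length = sL) := by
  by_cases h : full.take sL.length = sL
  · have hp : sL <+: full := List.prefix_iff_eq_take.mpr h.symm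
    simp [h, List.isPrefixOf_iff_prefix, hp]
  · have hp : ¬ sL <+: full := fun hp => h (List.prefix_iff_eq_take.mp hp).symm
    have hb : sL.isPrefixOf full = false :=
      Bool.eq_false_iff.mpr (fun hb => hp (List.isPrefixOf_iff_prefix.mp hb))
    simp [h, hb]

-- ===== VERDICT (by name: the statement is the Claim_ definition above) =====
theorem prefixOfArray_spec : Claim_equal_prefixOfArray := by
  intro s words _
  unfold Spec_prefixOfArray prefixOfArray prefixOfArray_alt
  rw [goA_eq s.toList words [] (by simp), isPrefixOf_eq_take]
  simp only [List.length_nil, List.nil_append]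
  by_cases hc : (pvAccLens 0 words).contains s.toList.length
  · simp
  · simp
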